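-- pv_equiv track=rewrite | github.com/Dicklesworthstone/tsap_mcp_server | src/tsap_mcp/utils/search.py | categorize_search_results
-- ===== SOURCE A (Python) =====
-- from typing import Any, Dict, List, Optional, Tuple, Union
--
-- def categorize_search_results(
--     results: List[Dict[str, Any]],
--     categories: List[str],
-- ) -> Dict[str, List[Dict[str, Any]]]:
--     """Categorize search results into groups.
--
--     Args:
--         results: Search results to categorize
--         categories: Categories to use (e.g., file types)
--
--     Returns:
--         Results categorized into groups
--     """
--     categorized = {}
--
--     # Initialize categories
--     for category in categories:
--         categorized[category] = []
--
--     # Add uncategorized for items that don't match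
--     categorized["other"] = []
--
--     # Categorize results
--     for result in results:
--         file_path = result.get("file", "")
--
--         # Find matching category
--         matched = False
--         for category in categories:
--             if file_path.endswith(f".{category}"):
--                 categorized[category].append(result)
--                 matched = True
--                 break
--
--         # Add to other if no category matched
--         if not matched:
--             categorized["other"].append(result)
--
--     return categorized
-- ===== SOURCE B (Python) =====
-- def categorize_search_results(results, categories):
--     """Category labelling done once per result, then buckets built per category
--     by filtering, instead of appending into a mutable dict result-by-result."""
--     def tag(result):
--         file_path = result.get("file", "")
--         for category in categories:
--             if file_path.endswith(f".{category}"):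
--                 return category
--         return "other"
--
--     tags = [tag(r) for r in results]
--     categorized = {c: [r for r, t in zip(results, tags) if t == c] for c in categories}
--     categorized["other"] = [r for r, t in zip(results, tags) if t == "other"]
--     return categorized
-- ===== Notes on version B (the rewrite author's own statement) =====
-- stated objective: alternative
-- what changed: B computes each result's category tag once (first matching category, else 'other') and builds every bucket by filtering on that tag per category, instead of A's result-major loop that appends each result into a mutable dict with a matched flag and break.
import Mathlib
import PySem

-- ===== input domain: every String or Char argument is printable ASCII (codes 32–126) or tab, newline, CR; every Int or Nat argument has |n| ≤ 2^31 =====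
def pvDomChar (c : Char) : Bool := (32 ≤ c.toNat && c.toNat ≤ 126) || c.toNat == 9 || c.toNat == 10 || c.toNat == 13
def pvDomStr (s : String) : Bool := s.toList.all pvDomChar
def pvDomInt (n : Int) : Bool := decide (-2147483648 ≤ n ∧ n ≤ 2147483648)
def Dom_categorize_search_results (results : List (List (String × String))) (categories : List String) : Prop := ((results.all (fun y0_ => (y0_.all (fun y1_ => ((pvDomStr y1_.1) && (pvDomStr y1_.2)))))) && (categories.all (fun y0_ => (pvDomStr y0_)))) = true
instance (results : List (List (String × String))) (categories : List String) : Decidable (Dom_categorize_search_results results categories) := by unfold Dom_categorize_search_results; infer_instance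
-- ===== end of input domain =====

-- B tags each result once (first matching category, else "other") and builds each bucket
-- by filtering on that tag, instead of A's result-major append-into-the-dict loop.

-- ===== PORT A =====
-- A's inner 'for category in categories: … break' loop: the first matching category, if any
def pvFindCat (fp : String) : List String → Option String
  | [] => none
  | c :: cs => if PySem.Str.endswith fp ("." ++ c) then some c else pvFindCat fp cs

def categorize_search_results (results : List (List (String × String))) (categories : List String) : List (String × List (List (String × String))) :=
  let categorized : PySem.Dict String (List (List (String × String))) :=
    categories.foldl (fun d category => d.insert category []) PySem.Dict.empty
  let categorized := categorized.insert "other" []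
  let categorized := results.foldl (fun d result =>
    let file_path := (PySem.Dict.mk result).getD "file" ""
    -- 'matched' flag + break: append to the first matching category, else to "other"
    match pvFindCat file_path categories with
    | some category => d.modify category [] (fun b => b ++ [result])
    | none => d.modify "other" [] (fun b => b ++ [result])) categorized
  categorized.items

-- ===== PORT B =====
-- Source B's tag(result): first category whose ".<category>" suffix matches, else "other"
def pvTagLoop (fp : String) : List String → String
  | [] => "other"
  | c :: cs => if PySem.Str.endswith fp ("." ++ c) then c else pvTagLoop fp cs

def pvTag (categories : List String) (result : List (String × String)) : String :=
  pvTagLoop ((PySem.Dict.mk result).getD "file" "") categories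

def categorize_search_results_alt (results : List (List (String × String))) (categories : List String) : List (String × List (List (String × String))) :=
  let tags := results.map (pvTag categories)
  let pairs := results.zip tags
  let categorized : PySem.Dict String (List (List (String × String))) :=
    categories.foldl (fun d c =>
      d.insert c ((pairs.filter (fun p => p.2 == c)).map (fun p => p.1))) PySem.Dict.empty
  let categorized := categorized.insert "other"
    ((pairs.filter (fun p => p.2 == "other")).map (fun p => p.1))
  categorized.items

-- ===== PRECONDITION & SPEC =====
def Spec_categorize_search_results (results : List (List (String × String))) (categories : List String) (out : List (String × List (List (String × String)))) : Prop := out = categorize_search_results_alt results categories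
instance (results : List (List (String × String))) (categories : List String) (out : List (String × List (List (String × String)))) : Decidable (Spec_categorize_search_results results categories out) := by unfold Spec_categorize_search_results; infer_instance

-- ===== CLAIM (what is proved, stated in full; the proofs are below) =====
def Claim_equal_categorize_search_results : Prop := ∀ (results : List (List (String × String))) (categories : List String), Dom_categorize_search_results results categories → Spec_categorize_search_results results categories (categorize_search_results results categories)

-- ===== LEMMAS AND PROOFS =====

theorem pvTagLoop_eq_findCat (fp : String) (cs : List String) :
    pvTagLoop fp cs = (match pvFindCat fp cs with | some c => c | none => "other") := by
  induction cs with
  | nil => rfl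
  | cons c cs ih =>
    simp only [pvTagLoop, pvFindCat]
    split_ifs <;> simp [ih]

theorem pvFindCat_mem (fp : String) (cs : List String) (c : String)
    (h : pvFindCat fp cs = some c) : c ∈ cs := by
  induction cs with
  | nil => simp [pvFindCat] at h
  | cons x xs ih =>
    simp only [pvFindCat] at h
    split_ifs at h with hx
    · cases h; exact List.mem_cons_self
    · exact List.mem_cons_of_mem _ (ih h)

theorem pvTag_mem (categories : List String) (r : List (String × String)) :
    pvTag categories r = "other" ∨ pvTag categories r ∈ categories := by
  rw [pvTag, pvTagLoop_eq_findCat]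
  cases h : pvFindCat ((PySem.Dict.mk r).getD "file" "") categories with
  | none => exact Or.inl rfl
  | some c => exact Or.inr (pvFindCat_mem _ _ c h)

theorem getD_foldl_insert_keyfun (cats : List String)
    (g : String → List (List (String × String)))
    (d : PySem.Dict String (List (List (String × String)))) (k : String) :
    (cats.foldl (fun d c => d.insert c (g c)) d).getD k []
      = if k ∈ cats then g k else d.getD k [] := by
  induction cats generalizing d with
  | nil => simp
  | cons c cs ih =>
    simp only [List.foldl_cons, ih, PySem.Dict.getD_insert]
    by_cases hcs : k ∈ cs
    · simp [hcs]
    · by_cases hkc : k = c <;> simp [hcs, hkc]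

theorem ports_eq (results : List (List (String × String))) (categories : List String) :
    (results.foldl (fun d result =>
            match pvFindCat ((PySem.Dict.mk result).getD "file" "") categories with
            | some category => d.modify category [] (fun b => b ++ [result])
            | none => d.modify "other" [] (fun b => b ++ [result]))
       ((categories.foldl (fun d category => d.insert category []) (PySem.Dict.empty : PySem.Dict String (List (List (String × String))))).insert "other" [])).items
    = ((categories.foldl (fun d c =>
          d.insert c (((results.zip (results.map (pvTag categories))).filter (fun p => p.2 == c)).map (fun p => p.1)))
          (PySem.Dict.empty : PySem.Dict String (List (List (String × String))))).insert "other"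
          (((results.zip (results.map (pvTag categories))).filter (fun p => p.2 == "other")).map (fun p => p.1))).items := by
  set tag := pvTag categories with htagdef
  set K : PySem.Set String := PySem.Set.add (PySem.Set.ofList categories) "other" with hK
  -- pairs = results paired with their tags
  have hpairs : results.zip (results.map tag) = results.map (fun r => (r, tag r)) := by
    induction results with
    | nil => rfl
    | cons r l ih => simp [ih]
  have hbkt : ∀ (c : String) (l : List (List (String × String))),
      ((l.map (fun r => (r, tag r))).filter (fun p => p.2 == c)).map (fun p => p.1)
        = l.filter (fun r => tag r == c) := by
    intro c l
    induction l with
    | nil => rfl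
    | cons r t ih =>
      by_cases h : tag r = c <;> simp [h, ih]
  have hbkt2 : ∀ (k : String) (l : List (List (String × String))),
      ((l.map (fun r => (tag r, r))).filter (fun p => p.1 == k)).map (fun p => p.2)
        = l.filter (fun r => tag r == k) := by
    intro k l
    induction l with
    | nil => rfl
    | cons r t ih =>
      by_cases h : tag r = k <;> simp [h, ih]
  -- A's per-result step is 'modify at the tag'
  have hstep : (fun (d : PySem.Dict String (List (List (String × String)))) result =>
      match pvFindCat ((PySem.Dict.mk result).getD "file" "") categories with
      | some category => d.modify category [] (fun b => b ++ [result])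
      | none => d.modify "other" [] (fun b => b ++ [result]))
      = fun d result => d.modify (tag result) [] (fun b => b ++ [result]) := by
    funext d r
    rw [htagdef, pvTag, pvTagLoop_eq_findCat]
    cases pvFindCat ((PySem.Dict.mk r).getD "file" "") categories <;> rfl
  rw [hstep]
  -- keys of the initialised dicts
  have hkeys0 : ∀ g : String → List (List (String × String)),
      (categories.foldl (fun d c => d.insert c (g c)) PySem.Dict.empty).keys
        = PySem.Set.ofList categories := by
    intro g
    have := PySem.Dict.keys_foldl_insert categories (fun _ c => g c) (PySem.Dict.empty)
    rw [PySem.Dict.keys_empty, PySem.Set.update_nil_left] at this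
    exact this
  have hinsK : ∀ (d : PySem.Dict String (List (List (String × String)))) v,
      d.keys = PySem.Set.ofList categories → (d.insert "other" v).keys = K := by
    intro d v hk
    by_cases h : "other" ∈ PySem.Set.ofList categories
    · rw [PySem.Dict.keys_insert_of_contains d v
        (by rw [PySem.Dict.contains_eq_decide_mem_keys, hk]; exact decide_eq_true h), hk, hK,
        PySem.Set.add_eq_ite, if_pos h]
    · rw [PySem.Dict.keys_insert_of_not_contains d v
        (by rw [PySem.Dict.contains_eq_decide_mem_keys, hk]; exact decide_eq_false h), hk, hK,
        PySem.Set.add_eq_ite, if_neg h]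
  have hKnodup : K.Nodup := PySem.Set.nodup_add _ _ (PySem.Set.nodup_ofList categories)
  have htagK : ∀ r, tag r ∈ K := by
    intro r
    rw [hK, PySem.Set.mem_add, PySem.Set.mem_ofList]
    rcases pvTag_mem categories r with h | h
    · exact Or.inr h
    · exact Or.inl h
  -- A side
  have hkeysA : (results.foldl (fun d result => d.modify (tag result) [] (fun b => b ++ [result]))
      ((categories.foldl (fun d category => d.insert category []) PySem.Dict.empty).insert "other" [])).keys = K := by
    have := PySem.Dict.keys_foldl_modify_key results tag ([] : List (List (String × String)))
      (fun _ r => fun b => b ++ [r])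
      ((categories.foldl (fun d category => d.insert category []) PySem.Dict.empty).insert "other" [])
    rw [this, hinsK _ _ (hkeys0 _), PySem.Set.update_eq_append_filter]
    have : (PySem.Set.ofList (results.map tag)).filter (fun y => !K.contains y) = [] := by
      rw [List.filter_eq_nil_iff]
      intro y hy
      rw [PySem.Set.mem_ofList, List.mem_map] at hy
      obtain ⟨r, _, rfl⟩ := hy
      simp
      exact htagK r
    rw [this, List.append_nil]
  have hgA : ∀ k : String,
      (results.foldl (fun d result => d.modify (tag result) [] (fun b => b ++ [result]))
        ((categories.foldl (fun d category => d.insert category []) PySem.Dict.empty).insert "other" [])).getD k []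
      = results.filter (fun r => tag r == k) := by
    intro k
    have hmapped : results.foldl (fun d result => d.modify (tag result) [] (fun b => b ++ [result]))
        ((categories.foldl (fun d category => d.insert category []) PySem.Dict.empty).insert "other" [])
      = (results.map (fun r => (tag r, r))).foldl (fun d p => d.modify p.1 [] (fun b => b ++ [p.2]))
        ((categories.foldl (fun d category => d.insert category []) PySem.Dict.empty).insert "other" []) := by
      rw [List.foldl_map]
    rw [hmapped, PySem.Dict.getD_foldl_modify_append]
    have hbase : ((categories.foldl (fun d category => d.insert category []) PySem.Dict.empty).insert "other"
        ([] : List (List (String × String)))).getD k [] = [] := by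
      rw [PySem.Dict.getD_insert]
      by_cases hko : k = "other"
      · simp [hko]
      · rw [if_neg hko, getD_foldl_insert_keyfun categories (fun _ => [])]
        by_cases hc : k ∈ categories <;> simp [hc]
    rw [hbase, List.nil_append]
    exact hbkt2 k results
  -- B side
  have hkeysB : ((categories.foldl (fun d c =>
        d.insert c (((results.zip (results.map tag)).filter (fun p => p.2 == c)).map (fun p => p.1)))
        PySem.Dict.empty).insert "other"
        (((results.zip (results.map tag)).filter (fun p => p.2 == "other")).map (fun p => p.1))).keys = K :=
    hinsK _ _ (hkeys0 _)
  have hgB : ∀ k : String, k ∈ K →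
      ((categories.foldl (fun d c =>
        d.insert c (((results.zip (results.map tag)).filter (fun p => p.2 == c)).map (fun p => p.1)))
        PySem.Dict.empty).insert "other"
        (((results.zip (results.map tag)).filter (fun p => p.2 == "other")).map (fun p => p.1))).getD k []
      = results.filter (fun r => tag r == k) := by
    intro k hk
    rw [PySem.Dict.getD_insert]
    by_cases hko : k = "other"
    · rw [if_pos hko, hpairs, hbkt _ results, hko]
    · rw [if_neg hko,
        getD_foldl_insert_keyfun categories
          (fun c => ((results.zip (results.map tag)).filter (fun p => p.2 == c)).map (fun p => p.1))]
      have hkc : k ∈ categories := by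
        rw [hK, PySem.Set.mem_add, PySem.Set.mem_ofList] at hk
        rcases hk with h | h
        · exact h
        · exact absurd h hko
      rw [if_pos hkc, hpairs, hbkt _ results]
  -- assemble
  have ndA : (results.foldl (fun d result => d.modify (tag result) [] (fun b => b ++ [result]))
      ((categories.foldl (fun d category => d.insert category []) PySem.Dict.empty).insert "other" [])).keys.Nodup := by
    rw [hkeysA]; exact hKnodup
  have ndB : ((categories.foldl (fun d c =>
        d.insert c (((results.zip (results.map tag)).filter (fun p => p.2 == c)).map (fun p => p.1)))
        PySem.Dict.empty).insert "other"
        (((results.zip (results.map tag)).filter (fun p => p.2 == "other")).map (fun p => p.1))).keys.Nodup := by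
    rw [hkeysB]; exact hKnodup
  rw [PySem.Dict.items_eq_map_keys _ ndA [], PySem.Dict.items_eq_map_keys _ ndB [], hkeysA, hkeysB]
  apply List.map_congr_left
  intro k hk
  rw [hgA k, hgB k hk]

-- ===== VERDICT (by name: the statement is the Claim_ definition above) =====
theorem categorize_search_results_spec : Claim_equal_categorize_search_results := by
  intro results categories _
  unfold Spec_categorize_search_results
  exact ports_eq results categories
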